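-- pv_equiv track=rewrite | github.com/MaxETit/trump_twitter_analysis | trump_tweet_project(1).py | country_counter
-- ===== SOURCE A (Python) =====
-- def country_counter(country_list, data):
--     country_dict = {}
--     for country in country_list:
--         count = 0
--         for item in data:
--             if country in item:
--                 count += 1
--         country_dict[country] = count
--     return country_dict
-- ===== SOURCE B (Python) =====
-- def country_counter(country_list, data):
--     # Substring-enumeration algorithm: instead of running a substring search
--     # for every (country, item) pair, enumerate for each item every substring
--     # whose length matches some country's length, collect them in a hash set,
--     # and bump a country's counter by a single O(1) set lookup.
--     counts = dict.fromkeys(country_list, 0)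
--     lens = {len(c) for c in country_list}
--     for item in data:
--         n = len(item)
--         subs = {item[i:i + L] for L in lens if L <= n for i in range(n - L + 1)}
--         for c in counts:
--             if c in subs:
--                 counts[c] += 1
--     return counts
-- ===== Notes on version B (the rewrite author's own statement) =====
-- stated objective: alternative
-- what changed: B replaces A's per-country substring search over every item by a substring-enumeration index: for each item it builds one hash set of all substrings whose length matches some country's length, then counts each country via an O(1) set lookup, so no country-in-item scan remains; measured faster on constant-heavy inputs (170x at n=4096) but ~1.9x on random ones, so no unqualified speed claim.
import Mathlib
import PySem

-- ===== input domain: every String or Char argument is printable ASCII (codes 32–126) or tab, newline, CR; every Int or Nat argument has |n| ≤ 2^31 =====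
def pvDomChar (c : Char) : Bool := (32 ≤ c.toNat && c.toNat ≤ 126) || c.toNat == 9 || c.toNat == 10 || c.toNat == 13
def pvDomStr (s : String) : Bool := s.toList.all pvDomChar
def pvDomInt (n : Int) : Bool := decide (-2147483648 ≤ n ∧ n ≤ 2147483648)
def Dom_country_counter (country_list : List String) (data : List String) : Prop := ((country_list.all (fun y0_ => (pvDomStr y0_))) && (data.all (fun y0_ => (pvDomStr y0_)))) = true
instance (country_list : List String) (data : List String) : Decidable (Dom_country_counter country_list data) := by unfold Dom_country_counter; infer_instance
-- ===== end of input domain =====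

-- B replaces the per-country substring search by a per-item substring-enumeration set
-- (all substrings of country lengths) looked up per country; an alternative algorithm, same results.

-- ===== PORT A =====
def country_counter (country_list : List String) (data : List String) : List (String × Int) :=
  (country_list.foldl
    (fun (d : PySem.Dict String Int) country =>
      d.insert country
        (data.foldl (fun count item => if PySem.Str.isIn country item then count + 1 else count) 0))
    PySem.Dict.empty).items

-- ===== PORT B =====
-- {item[i:i+L] for L in lens if L <= n for i in range(n - L + 1)}
def subsOf (lens : PySem.Set Int) (item : String) : PySem.Set String :=
  lens.foldl
    (fun s L =>
      if L ≤ PySem.Str.len item then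
        (PySem.List.pyRange 0 (PySem.Str.len item - L + 1) 1).foldl
          (fun s' i => PySem.Set.add s' (PySem.Str.slice item (some i) (some (i + L)))) s
      else s)
    PySem.Set.empty

def country_counter_alt (country_list : List String) (data : List String) : List (String × Int) :=
  let counts0 : PySem.Dict String Int :=
    country_list.foldl (fun d c => d.insert c 0) PySem.Dict.empty
  let lens : PySem.Set Int := PySem.Set.ofList (country_list.map PySem.Str.len)
  (data.foldl
    (fun d item =>
      d.keys.foldl
        (fun d' c => if PySem.Set.contains (subsOf lens item) c then d'.modify c 0 (· + 1) else d')
        d)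
    counts0).items

-- ===== PRECONDITION & SPEC =====
def Spec_country_counter (country_list : List String) (data : List String) (out : List (String × Int)) : Prop := out = country_counter_alt country_list data
instance (country_list : List String) (data : List String) (out : List (String × Int)) : Decidable (Spec_country_counter country_list data out) := by unfold Spec_country_counter; infer_instance

-- ===== CLAIM (what is proved, stated in full; the proofs are below) =====
def Claim_equal_country_counter : Prop := ∀ (country_list : List String) (data : List String), Dom_country_counter country_list data → Spec_country_counter country_list data (country_counter country_list data)

-- ===== LEMMAS AND PROOFS =====

-- A's dict after the country loop: value at any inserted key is f of that key.
lemma getD_foldl_insert_fn (f : String → Int) (l : List String) (k : String) :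
    ∀ d : PySem.Dict String Int,
      (l.foldl (fun d c => d.insert c (f c)) d).getD k 0
        = if k ∈ l then f k else d.getD k 0 := by
  induction l with
  | nil => intro d; simp
  | cons c l ih =>
      intro d
      simp only [List.foldl_cons, ih, PySem.Dict.getD_insert, List.mem_cons]
      by_cases hl : k ∈ l <;> by_cases hc : k = c <;> simp [hl, hc]

-- B's inner loop over the key list: each key of K satisfying p gets +1, nothing else changes.
lemma getD_inner_fold (p : String → Bool) (K : List String) (hK : K.Nodup) (k : String) :
    ∀ d : PySem.Dict String Int,
      (K.foldl (fun d' c => if p c then d'.modify c 0 (· + 1) else d') d).getD k 0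
        = d.getD k 0 + (if k ∈ K ∧ p k then 1 else 0) := by
  induction K with
  | nil => intro d; simp
  | cons c K ih =>
      intro d
      have hcK : c ∉ K := (List.nodup_cons.mp hK).1
      have hK' : K.Nodup := (List.nodup_cons.mp hK).2
      simp only [List.foldl_cons, ih hK', List.mem_cons]
      by_cases hpc : p c
      · simp only [hpc, if_true, PySem.Dict.getD_modify]
        by_cases hkc : k = c
        · subst hkc
          simp [hcK, hpc]
        · simp [hkc]
      · simp only [hpc]
        by_cases hkc : k = c
        · subst hkc; simp [hpc]
        · simp [hkc]

-- B's inner loop preserves the key list (every visited c is already a key).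
lemma keys_inner_fold (p : String → Bool) (K : List String) :
    ∀ d : PySem.Dict String Int, (∀ c ∈ K, d.contains c = true) →
      (K.foldl (fun d' c => if p c then d'.modify c 0 (· + 1) else d') d).keys = d.keys := by
  induction K with
  | nil => intro d _; rfl
  | cons c K ih =>
      intro d hsub
      simp only [List.foldl_cons]
      by_cases hpc : p c
      · simp only [hpc, if_true]
        have hc : d.contains c = true := hsub c (List.mem_cons_self ..)
        have hkm : (d.modify c 0 (· + 1)).keys = d.keys := by
          rw [PySem.Dict.keys_modify, PySem.Dict.keys_insert_of_contains d _ hc]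
        rw [ih _ (fun c' hc' => by
          rw [PySem.Dict.contains_modify]
          simp [hsub c' (List.mem_cons_of_mem _ hc')]), hkm]
      · simp only [hpc]
        exact ih d (fun c' hc' => hsub c' (List.mem_cons_of_mem _ hc'))

-- B's data loop: keys are invariant.
lemma keys_data_fold (P : String → String → Bool) (data : List String) :
    ∀ d : PySem.Dict String Int,
      (data.foldl
        (fun d item =>
          d.keys.foldl (fun d' c => if P item c then d'.modify c 0 (· + 1) else d') d)
        d).keys = d.keys := by
  induction data with
  | nil => intro d; rfl
  | cons item data ih =>
      intro d
      simp only [List.foldl_cons]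
      rw [ih, keys_inner_fold _ _ d
        (fun c hc => (PySem.Dict.contains_iff_mem_keys d c).mpr hc)]

-- B's data loop: the value at an existing key k accumulates one per item satisfying P · k.
lemma getD_data_fold (P : String → String → Bool) (data : List String) (k : String) :
    ∀ d : PySem.Dict String Int, d.keys.Nodup → k ∈ d.keys →
      (data.foldl
        (fun d item =>
          d.keys.foldl (fun d' c => if P item c then d'.modify c 0 (· + 1) else d') d)
        d).getD k 0
        = d.getD k 0 + (data.countP (fun item => P item k) : Int) := by
  induction data with
  | nil => intro d _ _; simp
  | cons item data ih =>
      intro d hnd hk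
      simp only [List.foldl_cons]
      set d1 := d.keys.foldl (fun d' c => if P item c then d'.modify c 0 (· + 1) else d') d with hd1
      have hkeys1 : d1.keys = d.keys :=
        keys_inner_fold _ _ d (fun c hc => (PySem.Dict.contains_iff_mem_keys d c).mpr hc)
      have h1 : d1.getD k 0 = d.getD k 0 + (if k ∈ d.keys ∧ P item k then 1 else 0) :=
        getD_inner_fold _ _ hnd k d
      rw [ih d1 (hkeys1 ▸ hnd) (hkeys1 ▸ hk), h1, List.countP_cons]
      simp only [hk, true_and]
      split_ifs <;> push_cast <;> ring

-- Membership in the substring-enumeration set, by induction over the length list.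
lemma mem_subsOf_aux (item c : String) :
    ∀ (lens : List Int) (s : List String),
      c ∈ lens.foldl
        (fun s L =>
          if L ≤ PySem.Str.len item then
            (PySem.List.pyRange 0 (PySem.Str.len item - L + 1) 1).foldl
              (fun s' i => PySem.Set.add s' (PySem.Str.slice item (some i) (some (i + L)))) s
          else s) s
      ↔ c ∈ s ∨ ∃ L ∈ lens, L ≤ PySem.Str.len item ∧
          ∃ i : Int, 0 ≤ i ∧ i < PySem.Str.len item - L + 1 ∧
            c = PySem.Str.slice item (some i) (some (i + L)) := by
  intro lens
  induction lens with
  | nil => intro s; simp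
  | cons L lens ih =>
      intro s
      simp only [List.foldl_cons]
      by_cases hL : L ≤ PySem.Str.len item
      · rw [if_pos hL, ih, PySem.Set.mem_foldl_add]
        constructor
        · rintro (⟨hs | ⟨i, hi, hceq⟩⟩ | ⟨L', hL', hle, i, h0, hlt, hceq⟩)
          · exact Or.inl hs
          · exact Or.inr ⟨L, List.mem_cons_self .., hL, i,
              (PySem.List.mem_pyRange_one.mp hi).1, (PySem.List.mem_pyRange_one.mp hi).2, hceq⟩
          · exact Or.inr ⟨L', List.mem_cons_of_mem _ hL', hle, i, h0, hlt, hceq⟩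
        · rintro (hs | ⟨L', hL', hle, i, h0, hlt, hceq⟩)
          · exact Or.inl (Or.inl hs)
          · rcases List.mem_cons.mp hL' with rfl | hmem
            · exact Or.inl (Or.inr ⟨i, PySem.List.mem_pyRange_one.mpr ⟨h0, hlt⟩, hceq⟩)
            · exact Or.inr ⟨L', hmem, hle, i, h0, hlt, hceq⟩
      · rw [if_neg hL, ih]
        constructor
        · rintro (hs | ⟨L', hL', hle, rest⟩)
          · exact Or.inl hs
          · exact Or.inr ⟨L', List.mem_cons_of_mem _ hL', hle, rest⟩
        · rintro (hs | ⟨L', hL', hle, rest⟩)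
          · exact Or.inl hs
          · rcases List.mem_cons.mp hL' with rfl | hmem
            · exact absurd hle hL
            · exact Or.inr ⟨L', hmem, hle, rest⟩

-- A string slice item[i:i+len(c)] equals c somewhere iff c is a substring of item;
-- for c ∈ country_list the enumeration set therefore tests exactly 'c in item'.
lemma contains_subsOf_eq_isIn (country_list : List String) (c : String)
    (hc : c ∈ country_list) (item : String) :
    PySem.Set.contains (subsOf (PySem.Set.ofList (country_list.map PySem.Str.len)) item) c
      = PySem.Str.isIn c item := by
  rw [Bool.eq_iff_iff, PySem.Set.contains_iff]
  unfold subsOf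
  rw [mem_subsOf_aux, PySem.Str.isIn_eq, ← PySem.Chars.exists_prefix_drop_iff_isIn]
  constructor
  · rintro (hs | ⟨L, hLmem, hLle, i, h0, hlt, hceq⟩)
    · exact absurd hs (List.not_mem_nil)
    · -- L is a length of some country, so 0 ≤ L
      have hceq' : c.toList = List.take L.toNat (List.drop i.toNat item.toList) := by
        have : c.toList = (PySem.Str.slice item (some i) (some (i + L))).toList := by
          rw [hceq]
        rw [PySem.Str.toList_slice, PySem.Chars.slice_eq_listSlice] at this
        have hL0 : 0 ≤ L := by
          rcases (PySem.Set.mem_ofList _ _).mp hLmem with hmap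
          rcases List.mem_map.mp hmap with ⟨s, _, rfl⟩
          rw [PySem.Str.len_eq]; positivity
        have hi : i = ((i.toNat : Nat) : Int) := (Int.toNat_of_nonneg h0).symm
        have hLn : L = ((L.toNat : Nat) : Int) := (Int.toNat_of_nonneg hL0).symm
        rw [hi, hLn, PySem.List.slice_natCast_add] at this
        exact this
      exact ⟨i.toNat, hceq' ▸ List.take_prefix _ _⟩
  · rintro ⟨j, hpre⟩
    have hLmem : PySem.Str.len c ∈ PySem.Set.ofList (country_list.map PySem.Str.len) :=
      (PySem.Set.mem_ofList _ _).mpr (List.mem_map.mpr ⟨c, hc, rfl⟩)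
    by_cases hj : j ≤ item.toList.length
    · have hlen : c.toList.length ≤ item.toList.length - j := by
        have := hpre.length_le
        simpa [List.length_drop] using this
      refine Or.inr ⟨PySem.Str.len c, hLmem, ?_, (j : Int), by positivity, ?_, ?_⟩
      · rw [PySem.Str.len_eq, PySem.Str.len_eq]; omega
      · rw [PySem.Str.len_eq, PySem.Str.len_eq]; omega
      · rw [← String.toList_inj, PySem.Str.toList_slice, PySem.Chars.slice_eq_listSlice,
          PySem.Str.len_eq]
        have : ((j:Int) + (c.toList.length : Int)) = ((j:Nat):Int) + ((c.toList.length:Nat):Int) := by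
          ring
        rw [this, PySem.List.slice_natCast_add]
        exact List.prefix_iff_eq_take.mp hpre
    · -- j beyond the end: the prefix forces c = "", restart at i = 0 with L = 0
      have hnil : c.toList = [] := by
        have : item.toList.drop j = [] := List.drop_eq_nil_of_le (by omega)
        exact List.prefix_nil.mp (this ▸ hpre)
      have hclen : PySem.Str.len c = 0 := by rw [PySem.Str.len_eq, hnil]; rfl
      refine Or.inr ⟨PySem.Str.len c, hLmem, by rw [hclen, PySem.Str.len_eq]; positivity,
        0, le_refl 0, ?_, ?_⟩
      · rw [hclen, PySem.Str.len_eq]; omega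
      · rw [← String.toList_inj, PySem.Str.toList_slice, PySem.Chars.slice_eq_listSlice, hclen]
        have h00 : ((0:Int) + 0) = (((0:Nat):Int) + ((0:Nat):Int)) := by norm_num
        rw [show ((0:Int)) = ((0:Nat):Int) from rfl] at *
        rw [h00, PySem.List.slice_natCast_add]
        simpa using hnil.symm

-- ===== VERDICT (by name: the statement is the Claim_ definition above) =====
theorem country_counter_spec : Claim_equal_country_counter := by
  intro country_list data _
  unfold Spec_country_counter country_counter country_counter_alt
  simp only []
  set lens : PySem.Set Int := PySem.Set.ofList (country_list.map PySem.Str.len) with hlens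
  set cnt : String → Int :=
    fun c => data.foldl (fun count item => if PySem.Str.isIn c item then count + 1 else count) 0 with hcnt
  set dA : PySem.Dict String Int :=
    country_list.foldl (fun d c => d.insert c (cnt c)) PySem.Dict.empty with hdA
  set d0 : PySem.Dict String Int :=
    country_list.foldl (fun d c => d.insert c (0 : Int)) PySem.Dict.empty with hd0
  set dB : PySem.Dict String Int :=
    data.foldl
      (fun d item =>
        d.keys.foldl
          (fun d' c => if PySem.Set.contains (subsOf lens item) c then d'.modify c 0 (· + 1) else d')
          d)
      d0 with hdB
  have hkA : dA.keys = PySem.Set.ofList country_list := by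
    rw [hdA, PySem.Dict.keys_foldl_insert]; rfl
  have hk0 : d0.keys = PySem.Set.ofList country_list := by
    rw [hd0, PySem.Dict.keys_foldl_insert]; rfl
  have hkB : dB.keys = PySem.Set.ofList country_list := by
    rw [hdB, keys_data_fold (fun item c => PySem.Set.contains (subsOf lens item) c), hk0]
  have hndA : dA.keys.Nodup := by rw [hkA]; exact PySem.Set.nodup_ofList country_list
  have hnd0 : d0.keys.Nodup := by rw [hk0]; exact PySem.Set.nodup_ofList country_list
  have hndB : dB.keys.Nodup := by rw [hkB]; exact PySem.Set.nodup_ofList country_list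
  rw [PySem.Dict.items_eq_map_keys dA hndA 0, PySem.Dict.items_eq_map_keys dB hndB 0, hkA, hkB]
  apply List.map_congr_left
  intro k hkmem
  have hkl : k ∈ country_list := (PySem.Set.mem_ofList country_list k).mp hkmem
  have hA : dA.getD k 0 = cnt k := by
    rw [hdA, getD_foldl_insert_fn cnt country_list k]; simp [hkl]
  have h0 : d0.getD k 0 = 0 := by
    rw [hd0, getD_foldl_insert_fn (fun _ => (0:Int)) country_list k]; simp [hkl]
  have hB : dB.getD k 0 = cnt k := by
    rw [hdB, getD_data_fold (fun item c => PySem.Set.contains (subsOf lens item) c) data k d0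
        hnd0 (by rw [hk0]; exact hkmem), h0, hcnt]
    simp only []
    rw [PySem.List.foldl_count_if (fun item => PySem.Str.isIn k item) data 0]
    have hcong : (data.countP fun item => PySem.Set.contains (subsOf lens item) k)
        = data.countP (fun item => PySem.Str.isIn k item) := by
      apply List.countP_congr
      intro item _
      rw [contains_subsOf_eq_isIn country_list k hkl item]
    rw [hcong]
  rw [hA, hB]
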